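-- pv_equiv track=rewrite | github.com/martin-anderson-graham/advent-of-code | 2019/Day 16 - Transmission/day16og.py | singlePhase
-- ===== SOURCE A (Python) =====
-- def singlePhase(inputArray, patternArray):
--     result = []
--
--     for a in range(len(inputArray)):
--
--
--         # build full pattern array
--         fullPatternArray = []
--         currentPatternArrayIndex = 0
--         while len(fullPatternArray) <= len(inputArray):
--             for b in range(a+1):
--                 fullPatternArray.append(patternArray[currentPatternArrayIndex])
--             currentPatternArrayIndex += 1
--             if currentPatternArrayIndex == len(patternArray):
--                 currentPatternArrayIndex = 0
--
--         #remove the first element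
--         fullPatternArray.pop(0)
--
--         resultSum = 0
--         #find sum
--         for k in range(len(inputArray)):
--             resultSum += inputArray[k]*fullPatternArray[k]
--
--         result.append(abs(resultSum)%10)
--
--     return result
-- ===== SOURCE B (Python) =====
-- def singlePhase(inputArray, patternArray):
--     # O(n log n): prefix sums, then each output row sums contiguous constant-pattern
--     # blocks instead of materialising the repeated pattern and dotting elementwise.
--     n = len(inputArray)
--     m = len(patternArray)
--     prefix = [0]
--     for v in inputArray:
--         prefix.append(prefix[-1] + v)
--     result = []
--     for a in range(n):
--         w = a + 1
--         s = 0
--         j = 0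
--         while j * w < n + 1:
--             start = max(j * w - 1, 0)
--             end = min((j + 1) * w - 1, n)
--             s += patternArray[j % m] * (prefix[end] - prefix[start])
--             j += 1
--         result.append(abs(s) % 10)
--     return result
-- ===== Notes on version B (the rewrite author's own statement) =====
-- stated objective: faster
-- what changed: Per output row, B no longer materialises the repeated pattern list and dots it elementwise; it builds one prefix-sum array and adds pattern[j % m] * (prefix[end] - prefix[start]) over the row's contiguous constant-pattern blocks.
-- outside the precondition, e.g. on singlePhase([1], []): A raises IndexError, B raises ZeroDivisionError
import Mathlib
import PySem

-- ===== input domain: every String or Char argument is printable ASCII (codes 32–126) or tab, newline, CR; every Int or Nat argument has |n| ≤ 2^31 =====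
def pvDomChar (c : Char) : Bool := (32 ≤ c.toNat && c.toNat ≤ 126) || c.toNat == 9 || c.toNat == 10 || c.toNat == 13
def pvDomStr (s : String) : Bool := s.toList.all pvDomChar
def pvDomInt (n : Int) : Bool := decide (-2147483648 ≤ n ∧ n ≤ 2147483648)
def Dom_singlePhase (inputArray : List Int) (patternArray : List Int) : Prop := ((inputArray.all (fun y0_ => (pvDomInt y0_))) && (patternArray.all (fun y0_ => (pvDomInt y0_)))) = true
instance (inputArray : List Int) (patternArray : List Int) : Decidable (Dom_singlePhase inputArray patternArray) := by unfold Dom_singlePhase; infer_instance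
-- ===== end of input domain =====

-- B replaces A's per-row "materialise the repeated pattern, then dot elementwise" by prefix sums
-- dotted against the contiguous constant-pattern blocks of each row; objective: faster.

-- ===== PORT A =====
-- while len(fullPatternArray) <= len(inputArray): append patternArray[idx] (a+1) times, cycle idx.
-- patternArray[idx]: idx < patternArray.length always holds under Pre_ (patternArray ≠ [] whenever the
-- loop runs), so the getD default 0 is never used; Python raises IndexError exactly on the excluded inputs.
def pvBuildLoop (n : Nat) (pat : List Int) (a : Nat) (full : List Int) (idx : Nat) : List Int :=
  if h : full.length ≤ n then
    pvBuildLoop n pat a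
      ((List.range (a + 1)).foldl (fun acc _ => acc ++ [pat.getD idx 0]) full)
      (if idx + 1 = pat.length then 0 else idx + 1)
  else full
termination_by n + 1 - full.length
decreasing_by
  simp only [PySem.List.foldl_append_singleton_eq_map, List.length_append, List.length_map,
    List.length_range]
  omega

def singlePhase (inputArray : List Int) (patternArray : List Int) : List Int :=
  (List.range inputArray.length).foldl (fun result a =>
    let full := pvBuildLoop inputArray.length patternArray a [] 0
    -- fullPatternArray.pop(0): the list has length > len(inputArray) ≥ 1 here, so pop(0) = tail
    let full2 := full.tail
    let resultSum := (List.range inputArray.length).foldl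
      (fun s k => s + inputArray.getD k 0 * full2.getD k 0) 0
    result ++ [Int.ofNat (resultSum.natAbs % 10)]) []

-- ===== PORT B =====
-- one output row: while j*(a+1) < n+1, add patternArray[j % m] * (prefix[end] - prefix[start]);
-- start = max(j*(a+1)-1, 0) is Nat subtraction (truncation = the max), end = min((j+1)*(a+1)-1, n).
-- patternArray[j % m]: Python B raises ZeroDivisionError iff m = 0, excluded by Pre_ whenever rows exist.
def pvBlockLoop (pat pre : List Int) (n m a : Nat) (j : Nat) (s : Int) : Int :=
  if _h : j * (a + 1) < n + 1 then
    pvBlockLoop pat pre n m a (j + 1)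
      (s + pat.getD (j % m) 0 *
        (pre.getD (min ((j + 1) * (a + 1) - 1) n) 0 - pre.getD (j * (a + 1) - 1) 0))
  else s
termination_by n + 1 - j
decreasing_by
  have : j ≤ j * (a + 1) := Nat.le_mul_of_pos_right j (by omega)
  omega

def singlePhase_alt (inputArray : List Int) (patternArray : List Int) : List Int :=
  let n := inputArray.length
  let m := patternArray.length
  let pre := inputArray.foldl (fun acc v => acc ++ [acc.getLastD 0 + v]) [0]
  (List.range n).foldl (fun result a =>
    let s := pvBlockLoop patternArray pre n m a 0 0
    result ++ [Int.ofNat (s.natAbs % 10)]) []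

-- ===== PRECONDITION & SPEC =====
-- Pre_ excludes patternArray = [] with inputArray ≠ []: there Python A raises IndexError
-- (and Python B raises ZeroDivisionError); neither returns a value.
def Pre_singlePhase (inputArray : List Int) (patternArray : List Int) : Prop :=
  patternArray ≠ [] ∨ inputArray = []
instance (inputArray : List Int) (patternArray : List Int) : Decidable (Pre_singlePhase inputArray patternArray) := by unfold Pre_singlePhase; infer_instance

def pvWitness_singlePhase : List Int × List Int := ([1, 2, 3, 4, 5], [0, 1, 0, -1])

def Spec_singlePhase (inputArray : List Int) (patternArray : List Int) (out : List Int) : Prop := out = singlePhase_alt inputArray patternArray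
instance (inputArray : List Int) (patternArray : List Int) (out : List Int) : Decidable (Spec_singlePhase inputArray patternArray out) := by unfold Spec_singlePhase; infer_instance

-- ===== CLAIM (what is proved, stated in full; the proofs are below) =====
def Claim_equal_singlePhase : Prop := ∀ (inputArray : List Int) (patternArray : List Int), Dom_singlePhase inputArray patternArray → Pre_singlePhase inputArray patternArray → Spec_singlePhase inputArray patternArray (singlePhase inputArray patternArray)

-- ===== LEMMAS AND PROOFS =====

-- the pattern weight used for output row of width w at input position k
def pvCoef (pat : List Int) (m w k : Nat) : Int := pat.getD (((k + 1) / w) % m) 0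

-- partial sums of xs starting from t (proof-side model of B's prefix list)
def pvPsums (t : Int) : List Int → List Int
  | [] => []
  | v :: vs => (t + v) :: pvPsums (t + v) vs

theorem pvPrefix_build (xs : List Int) : ∀ (acc : List Int) (t : Int), acc.getLastD 0 = t →
    xs.foldl (fun acc v => acc ++ [acc.getLastD 0 + v]) acc = acc ++ pvPsums t xs := by
  induction xs with
  | nil => intro acc t _; simp [pvPsums]
  | cons v vs ih =>
    intro acc t ht
    simp only [List.foldl_cons, ht, pvPsums]
    rw [ih (acc ++ [t + v]) (t + v) (by simp)]
    simp

theorem pvPsums_getD (xs : List Int) : ∀ (t : Int) (i : Nat), i < xs.length →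
    (pvPsums t xs).getD i 0 = t + ∑ k ∈ Finset.range (i + 1), xs.getD k 0 := by
  induction xs with
  | nil => intro t i h; simp at h
  | cons v vs ih =>
    intro t i h
    cases i with
    | zero => simp [pvPsums]
    | succ i =>
      simp only [pvPsums, List.getD_cons_succ]
      rw [ih (t + v) i (by simpa using h), Finset.sum_range_succ' (fun k => (v :: vs).getD k 0)]
      simp only [List.getD_cons_succ, List.getD_cons_zero]
      ring

theorem pvPre_getD (xs : List Int) (i : Nat) (h : i ≤ xs.length) :
    (xs.foldl (fun acc v => acc ++ [acc.getLastD 0 + v]) [0]).getD i 0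
      = ∑ k ∈ Finset.range i, xs.getD k 0 := by
  rw [pvPrefix_build xs [0] 0 rfl]
  cases i with
  | zero => simp
  | succ i =>
    have h2 : ([(0 : Int)] ++ pvPsums 0 xs).getD (i + 1) 0 = (pvPsums 0 xs).getD i 0 := by simp
    rw [h2, pvPsums_getD xs 0 i (by omega)]
    simp

-- ----- A-side characterisation -----

-- the full pattern list A builds for one row: J chunks of width w, chunk j constant pat[j % m]
def pvFlat (pat : List Int) (m w J : Nat) : List Int :=
  (List.range J).flatMap (fun j => List.replicate w (pat.getD (j % m) 0))

theorem pvFlat_length (pat : List Int) (m w : Nat) : ∀ J, (pvFlat pat m w J).length = J * w := by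
  intro J
  induction J with
  | zero => simp [pvFlat]
  | succ J ih =>
    simp only [pvFlat, List.range_succ, List.flatMap_append] at *
    simp [Nat.succ_mul]

theorem pvFlat_getD (pat : List Int) (m w : Nat) : ∀ J k, k < J * w →
    (pvFlat pat m w J).getD k 0 = pat.getD ((k / w) % m) 0 := by
  intro J
  induction J with
  | zero => intro k h; simp at h
  | succ J ih =>
    intro k h
    have hlen := pvFlat_length pat m w J
    have hsplit : pvFlat pat m w (J + 1)
        = pvFlat pat m w J ++ List.replicate w (pat.getD (J % m) 0) := by
      simp [pvFlat, List.range_succ]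
    have hmul : (J + 1) * w = J * w + w := by ring
    by_cases hk : k < J * w
    · rw [hsplit, List.getD_append _ _ _ _ (by omega), ih k hk]
    · have hw : 0 < w := by omega
      rw [hsplit, List.getD_append_right _ _ _ _ (by omega), hlen]
      have hdiv : k / w = J := Nat.div_eq_of_lt_le (by omega) (by omega)
      rw [hdiv]
      have hlt : k - J * w < w := by omega
      simp [hlt]

theorem pvCycle (m j : Nat) (hm : 1 ≤ m) :
    (if j % m + 1 = m then 0 else j % m + 1) = (j + 1) % m := by
  have hj : j % m < m := Nat.mod_lt _ (by omega)
  have key : (j + 1) % m = (j % m + 1) % m := by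
    conv_lhs => rw [← Nat.div_add_mod j m, Nat.add_assoc]
    rw [Nat.mul_add_mod]
  rw [key]
  by_cases h : j % m + 1 = m
  · simp [h]
  · rw [if_neg h, Nat.mod_eq_of_lt (show j % m + 1 < m by omega)]

theorem pvBuild_char (n : Nat) (pat : List Int) (a : Nat) (hm : pat ≠ []) :
    ∀ d j (full : List Int), full.length = j * (a + 1) → n / (a + 1) + 1 - j ≤ d →
      pvBuildLoop n pat a full (j % pat.length)
        = full ++ (List.range (n / (a + 1) + 1 - j)).flatMap
            (fun t => List.replicate (a + 1) (pat.getD ((j + t) % pat.length) 0)) := by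
  have hm1 : 1 ≤ pat.length := List.length_pos_of_ne_nil hm
  intro d
  induction d with
  | zero =>
    intro j full hlen hd
    have hstop : ¬ full.length ≤ n := by
      have h1 : n / (a + 1) * (a + 1) ≤ n := Nat.div_mul_le_self n (a + 1)
      have h2 : n % (a + 1) < a + 1 := Nat.mod_lt n (by omega)
      have h3 : n / (a + 1) * (a + 1) + n % (a + 1) = n := Nat.div_add_mod' n (a + 1)
      have h4 : (n / (a + 1) + 1) * (a + 1) ≤ j * (a + 1) :=
        Nat.mul_le_mul_right (a + 1) (by omega)
      have h5 : (n / (a + 1) + 1) * (a + 1) = n / (a + 1) * (a + 1) + (a + 1) := by ring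
      omega
    rw [pvBuildLoop]
    simp [hstop, show n / (a + 1) + 1 - j = 0 by omega]
  | succ d ih =>
    intro j full hlen hd
    by_cases hjJ : n / (a + 1) + 1 ≤ j
    · have hstop : ¬ full.length ≤ n := by
        have h1 : n / (a + 1) * (a + 1) ≤ n := Nat.div_mul_le_self n (a + 1)
        have h2 : n % (a + 1) < a + 1 := Nat.mod_lt n (by omega)
        have h3 : n / (a + 1) * (a + 1) + n % (a + 1) = n := Nat.div_add_mod' n (a + 1)
        have h4 : (n / (a + 1) + 1) * (a + 1) ≤ j * (a + 1) :=
          Nat.mul_le_mul_right (a + 1) hjJ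
        have h5 : (n / (a + 1) + 1) * (a + 1) = n / (a + 1) * (a + 1) + (a + 1) := by ring
        omega
      rw [pvBuildLoop]
      simp [hstop, show n / (a + 1) + 1 - j = 0 by omega]
    · have hgo : full.length ≤ n := by
        have h1 : j * (a + 1) ≤ n / (a + 1) * (a + 1) :=
          Nat.mul_le_mul_right (a + 1) (by omega)
        have h2 := Nat.div_mul_le_self n (a + 1)
        omega
      rw [pvBuildLoop]
      simp only [hgo, dif_pos, PySem.List.foldl_append_singleton_eq_map]
      have hconst : (List.range (a + 1)).map (fun _ => pat.getD (j % pat.length) 0)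
          = List.replicate (a + 1) (pat.getD (j % pat.length) 0) := by
        simp [List.map_const']
      rw [hconst, pvCycle pat.length j hm1]
      have hlen' : (full ++ List.replicate (a + 1) (pat.getD (j % pat.length) 0)).length
          = (j + 1) * (a + 1) := by
        simp [hlen]; ring
      rw [ih (j + 1) _ hlen' (by omega)]
      have hK : n / (a + 1) + 1 - j = (n / (a + 1) + 1 - (j + 1)) + 1 := by omega
      rw [hK, List.range_succ_eq_map]
      simp only [List.flatMap_cons, List.flatMap_map, List.append_assoc, Nat.add_zero]
      congr 2
      congr 1
      funext t
      have ht : j + 1 + t = j + Nat.succ t := by omega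
      rw [ht]

theorem pvTail_getD (l : List Int) (k : Nat) : l.tail.getD k 0 = l.getD (k + 1) 0 := by
  cases l <;> simp

-- sum over List.range = sum over Finset.range
theorem pvSum_map_range (f : Nat → Int) : ∀ n, ((List.range n).map f).sum = ∑ k ∈ Finset.range n, f k := by
  intro n
  induction n with
  | zero => simp
  | succ n ih => simp [List.range_succ, Finset.sum_range_succ, ih]

-- A's per-row dot product equals the common spec sum
theorem pvRowA_sum (inp pat : List Int) (a : Nat) (hm : pat ≠ []) :
    (List.range inp.length).foldl
        (fun s k => s + inp.getD k 0 * (pvBuildLoop inp.length pat a [] 0).tail.getD k 0) 0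
      = ∑ k ∈ Finset.range inp.length, inp.getD k 0 * pvCoef pat pat.length (a + 1) k := by
  have hm1 : 1 ≤ pat.length := List.length_pos_of_ne_nil hm
  have hchar := pvBuild_char inp.length pat a hm (inp.length / (a + 1) + 1) 0 [] (by simp) (by simp)
  rw [Nat.zero_mod] at hchar
  have hflat : pvBuildLoop inp.length pat a [] 0
      = pvFlat pat pat.length (a + 1) (inp.length / (a + 1) + 1) := by
    rw [hchar]; simp [pvFlat]
  rw [PySem.List.foldl_add]
  rw [show ((List.range inp.length).map
        (fun k => inp.getD k 0 * (pvBuildLoop inp.length pat a [] 0).tail.getD k 0))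
      = (List.range inp.length).map (fun k => inp.getD k 0 * pvCoef pat pat.length (a + 1) k) by
    apply List.map_congr_left
    intro k hk
    rw [List.mem_range] at hk
    have hb : k + 1 < (inp.length / (a + 1) + 1) * (a + 1) := by
      have h1 := Nat.div_mul_le_self inp.length (a + 1)
      have h3 : inp.length / (a + 1) * (a + 1) + inp.length % (a + 1) = inp.length :=
        Nat.div_add_mod' inp.length (a + 1)
      have h4 : inp.length % (a + 1) < a + 1 := Nat.mod_lt _ (by omega)
      have h5 : (inp.length / (a + 1) + 1) * (a + 1)
          = inp.length / (a + 1) * (a + 1) + (a + 1) := by ring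
      omega
    rw [hflat, pvTail_getD, pvFlat_getD pat pat.length (a + 1) _ (k + 1) hb]
    rfl]
  rw [pvSum_map_range]
  simp

-- ----- B-side characterisation -----

theorem pvBlock_char (inp pat : List Int) (a : Nat) (_hm : pat ≠ []) :
    ∀ d j (s : Int), inp.length + 1 - j ≤ d →
      pvBlockLoop pat (inp.foldl (fun acc v => acc ++ [acc.getLastD 0 + v]) [0])
          inp.length pat.length a j s
        = s + ∑ k ∈ Finset.Ico (min (j * (a + 1) - 1) inp.length) inp.length,
            inp.getD k 0 * pvCoef pat pat.length (a + 1) k := by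
  intro d
  induction d with
  | zero =>
    intro j s hd
    have hstop : ¬ j * (a + 1) < inp.length + 1 := by
      have : j ≤ j * (a + 1) := Nat.le_mul_of_pos_right j (by omega)
      omega
    rw [pvBlockLoop]
    simp [hstop, show min (j * (a + 1) - 1) inp.length = inp.length by omega]
  | succ d ih =>
    intro j s hd
    by_cases hc : j * (a + 1) < inp.length + 1
    · have hj : j ≤ inp.length := by
        have : j ≤ j * (a + 1) := Nat.le_mul_of_pos_right j (by omega)
        omega
      rw [pvBlockLoop]
      simp only [hc, dif_pos]
      rw [ih (j + 1) _ (by omega)]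
      have hmul : (j + 1) * (a + 1) = j * (a + 1) + (a + 1) := by ring
      have hst : min (j * (a + 1) - 1) inp.length = j * (a + 1) - 1 := by omega
      set st := j * (a + 1) - 1 with hstdef
      set e := min ((j + 1) * (a + 1) - 1) inp.length with hedef
      have hse : st ≤ e := by omega
      have hen : e ≤ inp.length := by omega
      have hPe := pvPre_getD inp e hen
      have hPst := pvPre_getD inp st (by omega)
      have hdiff : (inp.foldl (fun acc v => acc ++ [acc.getLastD 0 + v]) [0]).getD e 0
            - (inp.foldl (fun acc v => acc ++ [acc.getLastD 0 + v]) [0]).getD st 0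
          = ∑ k ∈ Finset.Ico st e, inp.getD k 0 := by
        rw [hPe, hPst, Finset.sum_Ico_eq_sub _ hse]
      have hcoef : ∀ k ∈ Finset.Ico st e, inp.getD k 0 * pvCoef pat pat.length (a + 1) k
          = inp.getD k 0 * pat.getD (j % pat.length) 0 := by
        intro k hk
        rw [Finset.mem_Ico] at hk
        have hq : (k + 1) / (a + 1) = j :=
          Nat.div_eq_of_lt_le (by omega) (by omega)
        simp [pvCoef, hq]
      have hblock : pat.getD (j % pat.length) 0 * (∑ k ∈ Finset.Ico st e, inp.getD k 0)
          = ∑ k ∈ Finset.Ico st e, inp.getD k 0 * pvCoef pat pat.length (a + 1) k := by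
        rw [Finset.sum_congr rfl hcoef, Finset.mul_sum]
        exact Finset.sum_congr rfl (fun k _ => by ring)
      rw [hst, hdiff, hblock]
      rw [add_assoc, Finset.sum_Ico_consecutive _ hse hen]
    · rw [pvBlockLoop]
      have : j * (a + 1) ≥ inp.length + 1 := by omega
      simp [hc, show min (j * (a + 1) - 1) inp.length = inp.length by omega]

-- B's per-row value equals the common spec sum
theorem pvRowB_sum (inp pat : List Int) (a : Nat) (hm : pat ≠ []) :
    pvBlockLoop pat (inp.foldl (fun acc v => acc ++ [acc.getLastD 0 + v]) [0])
        inp.length pat.length a 0 0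
      = ∑ k ∈ Finset.range inp.length, inp.getD k 0 * pvCoef pat pat.length (a + 1) k := by
  rw [pvBlock_char inp pat a hm (inp.length + 1) 0 0 (by omega)]
  have h0 : min (0 * (a + 1) - 1) inp.length = 0 := by omega
  rw [h0, ← Finset.range_eq_Ico, zero_add]

-- ===== VERDICT (by name: the statement is the Claim_ definition above) =====
theorem singlePhase_spec : Claim_equal_singlePhase := by
  unfold Claim_equal_singlePhase
  intro inp pat _ hpre
  unfold Spec_singlePhase singlePhase singlePhase_alt
  by_cases hinp : inp = []
  · subst hinp; simp
  · have hm : pat ≠ [] := by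
      rcases hpre with h | h
      · exact h
      · exact absurd h hinp
    simp only []
    rw [PySem.List.foldl_append_singleton_eq_map, PySem.List.foldl_append_singleton_eq_map]
    apply congrArg
    apply List.map_congr_left
    intro a _
    rw [pvRowA_sum inp pat a hm, pvRowB_sum inp pat a hm]
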